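-- pv_equiv track=rewrite | github.com/ftrbnd/quiz-generator | src/phases/quiz_generator.py | extract_first_question
-- ===== SOURCE A (Python) =====
-- def extract_first_question(quiz_text):
--     """Extract only the first question block from the generated quiz"""
--     lines = quiz_text.strip().split("\n")
--
--     first_q = []
--     collecting = False
--
--     for line in lines:
--         line_strip = line.strip()
--
--         if line_strip.startswith("1.") or line_strip.lower().startswith("question"):
--             collecting = True
--
--         if collecting:
--             first_q.append(line)
--
--         if line_strip.lower().startswith("d)"):
--             break
--
--     return "\n".join(first_q)
-- ===== SOURCE B (Python) =====
-- def extract_first_question(quiz_text):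
--     """Extract only the first question block from the generated quiz"""
--     lines = quiz_text.strip().split("\n")
--
--     def is_d(l):
--         return l.strip().lower().startswith("d)")
--
--     def is_marker(l):
--         s = l.strip()
--         return s.startswith("1.") or s.lower().startswith("question")
--
--     end = next((i for i, l in enumerate(lines) if is_d(l)), None)
--     prefix = lines if end is None else lines[:end + 1]
--     start = next((i for i, l in enumerate(prefix) if is_marker(l)), None)
--     if start is None:
--         return ""
--     return "\n".join(prefix[start:])
-- ===== Notes on version B (the rewrite author's own statement) =====
-- stated objective: alternative
-- what changed: Replaces the flag-driven accumulate-and-break loop by a locate-then-slice decomposition: first find the index of the terminating answer-option line, restrict to that prefix, then find the first question-marker line and join the slice from it.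
import Mathlib
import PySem

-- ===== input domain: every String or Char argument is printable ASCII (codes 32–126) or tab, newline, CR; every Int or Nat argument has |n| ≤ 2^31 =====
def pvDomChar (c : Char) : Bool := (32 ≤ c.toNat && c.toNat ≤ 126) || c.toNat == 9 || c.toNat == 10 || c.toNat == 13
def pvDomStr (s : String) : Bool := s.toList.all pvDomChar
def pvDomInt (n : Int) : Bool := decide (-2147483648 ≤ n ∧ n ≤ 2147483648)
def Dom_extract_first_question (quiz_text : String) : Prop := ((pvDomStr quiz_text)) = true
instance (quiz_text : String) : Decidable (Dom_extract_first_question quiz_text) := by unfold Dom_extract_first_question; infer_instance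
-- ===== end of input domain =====

-- B differs from A in decomposition only (locate-then-slice vs flag-driven loop); same return value.

-- ===== PORT A =====
-- literal port of A's for-loop: accumulator first_q, flag collecting, early break on 'd)'
def pvLoopA : List String → Bool → List String
  | [], _ => []
  | l :: ls, c =>
    let s := PySem.Str.strip l
    let c' := c || PySem.Str.startswith s "1." || PySem.Str.startswith (PySem.Str.lower s) "question"
    let here := if c' then [l] else []
    if PySem.Str.startswith (PySem.Str.lower s) "d)" then here
    else here ++ pvLoopA ls c'

def extract_first_question (quiz_text : String) : String :=
  PySem.Str.join "\n" (pvLoopA (((PySem.Str.split? (PySem.Str.strip quiz_text) "\n").getD [])) false)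

-- ===== PORT B =====
def pvIsD (l : String) : Bool :=
  PySem.Str.startswith (PySem.Str.lower (PySem.Str.strip l)) "d)"

def pvIsMarker (l : String) : Bool :=
  PySem.Str.startswith (PySem.Str.strip l) "1." ||
  PySem.Str.startswith (PySem.Str.lower (PySem.Str.strip l)) "question"

def extract_first_question_alt (quiz_text : String) : String :=
  let lines := ((PySem.Str.split? (PySem.Str.strip quiz_text) "\n").getD [])
  let pre := match lines.findIdx? pvIsD with
    | none => lines
    | some i => lines.take (i + 1)
  match pre.findIdx? pvIsMarker with
  | none => ""
  | some s => PySem.Str.join "\n" (pre.drop s)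

-- ===== PRECONDITION & SPEC =====
def Spec_extract_first_question (quiz_text : String) (out : String) : Prop := out = extract_first_question_alt quiz_text
instance (quiz_text : String) (out : String) : Decidable (Spec_extract_first_question quiz_text out) := by unfold Spec_extract_first_question; infer_instance

-- ===== CLAIM (what is proved, stated in full; the proofs are below) =====
def Claim_equal_extract_first_question : Prop := ∀ (quiz_text : String), Dom_extract_first_question quiz_text → Spec_extract_first_question quiz_text (extract_first_question quiz_text)

-- ===== LEMMAS AND PROOFS =====

-- the lines up to and including the first 'd)' line (all lines if there is none)
def pvCut (ls : List String) : List String :=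
  match ls.findIdx? pvIsD with
  | none => ls
  | some i => ls.take (i + 1)

theorem pvCut_cons (l : String) (ls : List String) :
    pvCut (l :: ls) = if pvIsD l then [l] else l :: pvCut ls := by
  simp only [pvCut, List.findIdx?_cons]
  split_ifs with h
  · simp
  · cases ls.findIdx? pvIsD <;> simp

theorem pvLoopA_cons (l : String) (ls : List String) (c : Bool) :
    pvLoopA (l :: ls) c =
      (if c || pvIsMarker l then [l] else []) ++
        (if pvIsD l then [] else pvLoopA ls (c || pvIsMarker l)) := by
  simp only [pvLoopA, pvIsMarker, pvIsD, Bool.or_assoc]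
  split_ifs <;> simp_all

theorem pvLoopA_true (ls : List String) : pvLoopA ls true = pvCut ls := by
  induction ls with
  | nil => simp [pvLoopA, pvCut]
  | cons l ls ih =>
    rw [pvCut_cons, pvLoopA_cons]
    simp only [Bool.true_or, if_true]
    split_ifs with h <;> simp [ih]

theorem pvLoopA_false (ls : List String) :
    pvLoopA ls false =
      (match (pvCut ls).findIdx? pvIsMarker with
        | none => []
        | some s => (pvCut ls).drop s) := by
  induction ls with
  | nil => simp [pvLoopA, pvCut]
  | cons l ls ih =>
    rw [pvCut_cons, pvLoopA_cons]
    by_cases hm : pvIsMarker l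
    · by_cases hd : pvIsD l
      · simp [hm, hd, List.findIdx?_cons]
      · simp [hm, hd, pvLoopA_true, List.findIdx?_cons]
    · by_cases hd : pvIsD l
      · simp [hm, hd, List.findIdx?_cons]
      · simp only [hm, hd, if_false, Bool.false_or, List.nil_append, if_neg,
          Bool.false_eq_true, not_false_eq_true]
        rw [ih]
        simp only [List.findIdx?_cons, hm, Bool.false_eq_true, if_false, if_neg,
          not_false_eq_true]
        cases h : (pvCut ls).findIdx? pvIsMarker <;> simp

-- ===== VERDICT (by name: the statement is the Claim_ definition above) =====
theorem extract_first_question_spec : Claim_equal_extract_first_question := by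
  intro q _
  unfold Spec_extract_first_question extract_first_question extract_first_question_alt
  rw [pvLoopA_false]
  unfold pvCut
  generalize ((PySem.Str.split? (PySem.Str.strip q) "\n").getD []) = L
  cases h : List.findIdx? pvIsD L with
  | none =>
    simp only [h]
    cases h2 : List.findIdx? pvIsMarker L <;> simp only [h2] <;> rfl
  | some i =>
    simp only [h]
    cases h2 : List.findIdx? pvIsMarker (L.take (i + 1)) <;> simp only [h2] <;> rfl
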